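-- pv_equiv track=rewrite | github.com/HdWangUAG/TransF_biosensor | TF_AcrR_redesign/pocket_redesign/cotimed_predict/helperfunction/cotimedutils.py | all_on_1chain
-- ===== SOURCE A (Python) =====
-- from typing import Dict, List
--
-- def all_on_1chain(all_predict: List[Dict[str, str]], single_chain: str, new_name: str) -> Dict[str, str]:
--     """
--     Apply mutations across all residues of a single chain (for homodimers).
--     """
--     mutated_all = {}
--     for i, mutation_set in enumerate(all_predict, start=1):
--         mutated_seq = list(single_chain)
--         for pos, aa in mutation_set.items():
--             idx = int(pos) - 1
--             if 0 <= idx < len(mutated_seq):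
--                 mutated_seq[idx] = aa
--         mutated_all[f"{new_name}_{i}"] = "".join(mutated_seq)
--     return mutated_all
-- ===== SOURCE B (Python) =====
-- from typing import Dict, List
--
-- def all_on_1chain(all_predict: List[Dict[str, str]], single_chain: str, new_name: str) -> Dict[str, str]:
--     """
--     Apply mutations across all residues of a single chain (for homodimers).
--     Sort-and-splice: build an index->aa map, then stitch the sequence from
--     untouched slices of the original chain and the replacement residues.
--     """
--     n = len(single_chain)
--     mutated_all = {}
--     for i, mutation_set in enumerate(all_predict, start=1):
--         amap = {int(pos) - 1: aa for pos, aa in mutation_set.items()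
--                 if 0 <= int(pos) - 1 < n}
--         parts = []
--         prev = 0
--         for idx in sorted(amap):
--             parts.append(single_chain[prev:idx])
--             parts.append(amap[idx])
--             prev = idx + 1
--         parts.append(single_chain[prev:])
--         mutated_all[f"{new_name}_{i}"] = "".join(parts)
--     return mutated_all
-- ===== Notes on version B (the rewrite author's own statement) =====
-- stated objective: alternative
-- what changed: A copies the chain into a list and overwrites mutated positions in place; B builds an index->residue map, sorts the mutated indices and stitches the result from untouched slices of the original chain and the replacement residues.
import Mathlib
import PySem

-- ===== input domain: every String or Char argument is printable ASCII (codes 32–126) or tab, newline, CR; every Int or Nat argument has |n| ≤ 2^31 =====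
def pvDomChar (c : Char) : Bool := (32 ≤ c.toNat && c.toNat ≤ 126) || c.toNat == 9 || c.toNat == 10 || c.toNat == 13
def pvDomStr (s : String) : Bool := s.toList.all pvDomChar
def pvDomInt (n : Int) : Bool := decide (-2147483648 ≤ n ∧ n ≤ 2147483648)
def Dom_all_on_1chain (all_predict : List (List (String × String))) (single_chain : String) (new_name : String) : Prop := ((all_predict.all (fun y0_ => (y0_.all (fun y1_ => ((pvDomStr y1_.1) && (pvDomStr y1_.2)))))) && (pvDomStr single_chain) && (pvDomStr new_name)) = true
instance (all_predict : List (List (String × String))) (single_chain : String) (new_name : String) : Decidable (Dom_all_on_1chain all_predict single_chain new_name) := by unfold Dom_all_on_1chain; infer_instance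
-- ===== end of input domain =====

-- B replaces A's copy-then-overwrite loop by sort-and-splice (index map, sorted indices, slices of the original chain); alternative decomposition, same cost.


-- idx = int(pos) - 1 (Pre_ guarantees int(pos) parses, so the getD 0 default is never taken)
def pvIdx (pos : String) : Int := (PySem.Int.ofStr? pos).getD 0 - 1

-- f"{new_name}_{i}" at the List Char level
def pvKey (new_name : String) (i : Int) : String := String.ofList (new_name.toList ++ '_' :: PySem.Int.toChars i)

-- ===== PORT A =====
-- the inner loop of A: selectively overwrite entries of the residue list (each entry a List Char)
def pvSeqA (init : List (List Char)) (mset : List (String × String)) : List (List Char) :=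
  mset.foldl
    (fun seq m =>
      let idx := pvIdx m.1
      if 0 ≤ idx ∧ idx < (seq.length : Int) then seq.set idx.toNat m.2.toList else seq)
    init

def all_on_1chain (all_predict : List (List (String × String))) (single_chain : String) (new_name : String) : List (String × String) :=
  ((PySem.List.enumerate all_predict 1).foldl
    (fun mutated_all p =>
      mutated_all.insert (pvKey new_name p.1)
        (String.ofList (pvSeqA (single_chain.toList.map (fun c => [c])) p.2).flatten))
    (PySem.Dict.empty : PySem.Dict String String)).items

-- ===== PORT B =====
-- B's dict comprehension: index -> replacement residue, in-range only, last value wins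
def pvAmapB (n : Int) (mset : List (String × String)) : PySem.Dict Int (List Char) :=
  mset.foldl
    (fun d m =>
      let idx := pvIdx m.1
      if 0 ≤ idx ∧ idx < n then d.insert idx m.2.toList else d)
    PySem.Dict.empty

-- B's splice loop: walk the sorted mutated indices, emitting untouched slices and replacements
def pvSpliceB (chain : List Char) (amap : PySem.Dict Int (List Char)) : List Char :=
  let st := (PySem.List.sorted amap.keys (fun k => k) false).foldl
    (fun st idx =>
      (st.1 ++ [PySem.List.slice chain (some st.2) (some idx), amap.getD idx []], idx + 1))
    (([] : List (List Char)), (0 : Int))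
  (st.1 ++ [PySem.List.slice chain (some st.2) none]).flatten

def all_on_1chain_alt (all_predict : List (List (String × String))) (single_chain : String) (new_name : String) : List (String × String) :=
  ((PySem.List.enumerate all_predict 1).foldl
    (fun mutated_all p =>
      mutated_all.insert (pvKey new_name p.1)
        (String.ofList (pvSpliceB single_chain.toList (pvAmapB (single_chain.toList.length : Int) p.2))))
    (PySem.Dict.empty : PySem.Dict String String)).items

-- ===== PRECONDITION & SPEC =====
-- Pre_ excludes (a) mutation sets with a position key that int() cannot parse — there A raises ValueError —
-- and (b) association lists with duplicate position keys, which cannot arise from a Python dict and on which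
-- the collapsed dict's iteration order is accidental.
def Pre_all_on_1chain (all_predict : List (List (String × String))) (single_chain : String) (new_name : String) : Prop :=
  ∀ mset ∈ all_predict, (mset.map Prod.fst).Nodup ∧ ∀ m ∈ mset, (PySem.Int.ofStr? m.1).isSome
instance (all_predict : List (List (String × String))) (single_chain : String) (new_name : String) : Decidable (Pre_all_on_1chain all_predict single_chain new_name) := by unfold Pre_all_on_1chain; infer_instance

def pvWitness_all_on_1chain : (List (List (String × String))) × String × String := ([[("2", "W"), ("9", "Y")], [("1", "M")]], "ACDEF", "nm")

def Spec_all_on_1chain (all_predict : List (List (String × String))) (single_chain : String) (new_name : String) (out : List (String × String)) : Prop := out = all_on_1chain_alt all_predict single_chain new_name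
instance (all_predict : List (List (String × String))) (single_chain : String) (new_name : String) (out : List (String × String)) : Decidable (Spec_all_on_1chain all_predict single_chain new_name out) := by unfold Spec_all_on_1chain; infer_instance

-- ===== CLAIM (what is proved, stated in full; the proofs are below) =====
def Claim_equal_all_on_1chain : Prop := ∀ (all_predict : List (List (String × String))) (single_chain : String) (new_name : String), Dom_all_on_1chain all_predict single_chain new_name → Pre_all_on_1chain all_predict single_chain new_name → Spec_all_on_1chain all_predict single_chain new_name (all_on_1chain all_predict single_chain new_name)

-- ===== LEMMAS AND PROOFS =====

theorem pvSeqA_append (init : List (List Char)) (ms : List (String × String)) (m : String × String) :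
    pvSeqA init (ms ++ [m]) =
      (if 0 ≤ pvIdx m.1 ∧ pvIdx m.1 < ((pvSeqA init ms).length : Int)
       then (pvSeqA init ms).set (pvIdx m.1).toNat m.2.toList else pvSeqA init ms) := by
  simp [pvSeqA, List.foldl_append]

theorem pvAmapB_append (n : Int) (ms : List (String × String)) (m : String × String) :
    pvAmapB n (ms ++ [m]) =
      (if 0 ≤ pvIdx m.1 ∧ pvIdx m.1 < n
       then (pvAmapB n ms).insert (pvIdx m.1) m.2.toList else pvAmapB n ms) := by
  simp [pvAmapB, List.foldl_append]

-- L1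
theorem pv_lenA (mset : List (String × String)) (init : List (List Char)) :
    (pvSeqA init mset).length = init.length := by
  induction mset using List.reverseRecOn with
  | nil => rfl
  | append_singleton ms m ih =>
      rw [pvSeqA_append]
      split_ifs with h
      · simp [ih]
      · exact ih

-- L2
theorem pv_elemA (mset : List (String × String)) (init : List (List Char)) (j : Nat) (hj : j < init.length) :
    (pvSeqA init mset).getD j [] = ((pvAmapB (init.length : Int) mset).get? (j : Int)).getD (init.getD j []) := by
  induction mset using List.reverseRecOn with
  | nil => simp [pvSeqA, pvAmapB, PySem.Dict.get?_empty]
  | append_singleton ms m ih =>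
      rw [pvSeqA_append, pvAmapB_append, pv_lenA]
      split_ifs with h
      · rw [PySem.Dict.get?_insert]
        by_cases hje : (j : Int) = pvIdx m.1
        · rw [if_pos hje]
          have hjt : (pvIdx m.1).toNat = j := by omega
          have hlt : j < (pvSeqA init ms).length := by rw [pv_lenA]; exact hj
          simp [List.getD, hjt, hlt]
        · rw [if_neg hje, ← ih]
          have hne : (pvIdx m.1).toNat ≠ j := by omega
          simp [List.getD, List.getElem?_set_ne hne]
      · exact ih

-- L3: flatten as a flatMap over indices
theorem pv_flatten_eq (L : List (List Char)) :
    L.flatten = (List.range' 0 L.length).flatMap (fun j => L.getD j []) := by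
  induction L with
  | nil => rfl
  | cons x xs ih =>
      simp only [List.length_cons, List.flatten_cons]
      rw [List.range'_succ, List.flatMap_cons]
      have h1 : (List.range' 1 xs.length).flatMap (fun j => (x :: xs).getD j []) =
          (List.range' 0 xs.length).flatMap (fun j => xs.getD j []) := by
        rw [List.range'_eq_map_range, List.range'_eq_map_range, List.flatMap_map, List.flatMap_map]
        apply List.flatMap_congr
        intro j hj
        simp [Nat.add_comm 1 j]
      rw [h1, ← ih]
      simp

-- L4: take-1 chunks reassemble a drop/take
theorem pv_chunks (chain : List Char) (m p : Nat) :
    (List.range' p m).flatMap (fun j => (chain.drop j).take 1) = (chain.drop p).take m := by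
  induction m generalizing p with
  | zero => simp
  | succ k ih =>
      rw [List.range'_succ, List.flatMap_cons, ih (p + 1)]
      by_cases hp : p < chain.length
      · have : chain.drop p = chain[p] :: chain.drop (p + 1) := List.drop_eq_getElem_cons hp
        rw [this]
        simp only [List.take_succ_cons, List.take_zero, List.cons_append, List.nil_append]
      · have h1 : chain.drop p = [] := List.drop_eq_nil_of_le (by omega)
        have h2 : chain.drop (p + 1) = [] := List.drop_eq_nil_of_le (by omega)
        simp [h1, h2]

-- keys of the index map are unique
theorem pv_nodup_keys (n : Int) (mset : List (String × String)) : (pvAmapB n mset).keys.Nodup := by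
  induction mset using List.reverseRecOn with
  | nil => exact PySem.Dict.nodup_keys_empty
  | append_singleton ms m ih =>
      rw [pvAmapB_append]
      split_ifs with h
      · exact PySem.Dict.nodup_keys_insert _ _ _ ih
      · exact ih

-- keys of the index map are in range
theorem pv_keys_range (n : Int) (mset : List (String × String)) :
    ∀ k ∈ (pvAmapB n mset).keys, 0 ≤ k ∧ k < n := by
  induction mset using List.reverseRecOn with
  | nil => intro k hk; simp [pvAmapB, PySem.Dict.keys_empty] at hk
  | append_singleton ms m ih =>
      rw [pvAmapB_append]
      split_ifs with h
      · intro k hk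
        rcases (PySem.Dict.mem_keys_insert _ _ _ _).1 hk with h1 | h1
        · subst h1; exact h
        · exact ih k h1
      · exact ih

-- the splice loop, unrolled against a sorted, bounded index list
theorem pv_splice_loop (chain : List Char) (amap : PySem.Dict Int (List Char))
    (ks : List Int) (prev : Nat) (parts0 : List (List Char))
    (hs : ks.Pairwise (· < ·)) (hb : ∀ k ∈ ks, (prev : Int) ≤ k ∧ k < (chain.length : Int)) :
    ((ks.foldl (fun st idx =>
        (st.1 ++ [PySem.List.slice chain (some st.2) (some idx), amap.getD idx []], idx + 1))
        (parts0, (prev : Int))).1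
      ++ [PySem.List.slice chain (some ((ks.foldl (fun st idx =>
        (st.1 ++ [PySem.List.slice chain (some st.2) (some idx), amap.getD idx []], idx + 1))
        (parts0, (prev : Int))).2)) none]).flatten
    = parts0.flatten ++ (List.range' prev (chain.length - prev)).flatMap
        (fun (j : Nat) => if ((j : Int) ∈ ks) then amap.getD (j : Int) [] else (chain.drop j).take 1) := by
  induction ks generalizing prev parts0 with
  | nil =>
      simp only [List.foldl_nil, List.flatten_append]
      rw [PySem.List.slice_from_natCast]
      have : (List.range' prev (chain.length - prev)).flatMap
          (fun (j : Nat) => if ((j : Int) ∈ ([] : List Int)) then amap.getD (j : Int) [] else (chain.drop j).take 1)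
          = (List.range' prev (chain.length - prev)).flatMap (fun j => (chain.drop j).take 1) := by
        apply List.flatMap_congr; intro j hj; simp
      rw [this, pv_chunks]
      have : (chain.drop prev).take (chain.length - prev) = chain.drop prev := by
        apply List.take_of_length_le; simp
      rw [this]; simp
  | cons k ks ih =>
      obtain ⟨hpk, hkn⟩ := hb k List.mem_cons_self
      have hk0 : 0 ≤ k := le_trans (by omega) hpk
      obtain ⟨kn, rfl⟩ : ∃ m : Nat, k = (m : Int) := ⟨k.toNat, by omega⟩
      have hprevk : prev ≤ kn := by exact_mod_cast hpk
      have hknlen : kn < chain.length := by exact_mod_cast hkn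
      rw [List.foldl_cons]
      have hstep : ((parts0, (prev : Int)).1 ++ [PySem.List.slice chain (some (parts0, (prev : Int)).2) (some ((kn : Nat) : Int)), amap.getD ((kn : Nat) : Int) []], ((kn : Nat) : Int) + 1)
          = (parts0 ++ [PySem.List.slice chain (some (prev : Int)) (some ((kn : Nat) : Int)), amap.getD ((kn : Nat) : Int) []], ((kn + 1 : Nat) : Int)) := by
        simp
      rw [hstep]
      rw [ih (kn + 1) _ hs.of_cons (fun j hj => ⟨by have := (List.pairwise_cons.1 hs).1 j hj; push_cast; omega,
            (hb j (List.mem_cons_of_mem _ hj)).2⟩)]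
      -- assemble
      rw [List.flatten_append, List.flatten_cons, List.flatten_cons, List.flatten_nil, List.append_nil]
      rw [PySem.List.slice_natCast]
      -- split the range
      have hsplit : List.range' prev (chain.length - prev)
          = List.range' prev (kn - prev) ++ [kn] ++ List.range' (kn + 1) (chain.length - (kn + 1)) := by
        have h1 := List.range'_append_1 (s := prev) (m := kn - prev) (n := 1 + (chain.length - (kn + 1)))
        have h2 := List.range'_append_1 (s := prev + (kn - prev)) (m := 1) (n := chain.length - (kn + 1))
        have e1 : prev + (kn - prev) = kn := by omega
        have e2 : kn - prev + (1 + (chain.length - (kn + 1))) = chain.length - prev := by omega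
        have e3 : 1 + (chain.length - (kn + 1)) = chain.length - kn := by omega
        rw [e1] at h1 h2
        rw [e2] at h1
        rw [← h1, ← h2]
        simp [List.range'_one]
      rw [hsplit]
      simp only [List.flatMap_append]
      have hfirst : (List.range' prev (kn - prev)).flatMap
          (fun (j : Nat) => if ((j : Int) ∈ ((kn : Nat) : Int) :: ks) then amap.getD (j : Int) [] else (chain.drop j).take 1)
          = (chain.drop prev).take (kn - prev) := by
        rw [← pv_chunks chain (kn - prev) prev]
        apply List.flatMap_congr
        intro j hj
        have hjlt : j < kn := by have := List.mem_range'_1.1 hj; omega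
        rw [if_neg]
        intro hmem
        rcases List.mem_cons.1 hmem with h1 | h1
        · omega
        · have := (List.pairwise_cons.1 hs).1 _ h1; omega
      have hmid : ([kn] : List Nat).flatMap
          (fun (j : Nat) => if ((j : Int) ∈ ((kn : Nat) : Int) :: ks) then amap.getD (j : Int) [] else (chain.drop j).take 1)
          = amap.getD ((kn : Nat) : Int) [] := by
        simp
      have hrest : (List.range' (kn + 1) (chain.length - (kn + 1))).flatMap
          (fun (j : Nat) => if ((j : Int) ∈ ((kn : Nat) : Int) :: ks) then amap.getD (j : Int) [] else (chain.drop j).take 1)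
          = (List.range' (kn + 1) (chain.length - (kn + 1))).flatMap
          (fun (j : Nat) => if ((j : Int) ∈ ks) then amap.getD (j : Int) [] else (chain.drop j).take 1) := by
        apply List.flatMap_congr
        intro j hj
        have hjgt : kn < j := by have := List.mem_range'_1.1 hj; omega
        by_cases hmem : (j : Int) ∈ ks
        · rw [if_pos (List.mem_cons_of_mem _ hmem), if_pos hmem]
        · rw [if_neg, if_neg hmem]
          intro hc; rcases List.mem_cons.1 hc with h1 | h1
          · omega
          · exact hmem h1
      rw [hfirst, hmid, hrest]
      simp

theorem pv_pairwise_sorted (amap : PySem.Dict Int (List Char)) (hnd : amap.keys.Nodup) :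
    (PySem.List.sorted amap.keys (fun k => k) false).Pairwise (· < ·) := by
  have h1 : (PySem.List.sorted amap.keys (fun k => k) false).Pairwise (· ≤ ·) :=
    PySem.List.sorted_pairwise amap.keys (fun k => k)
  have h2 : (PySem.List.sorted amap.keys (fun k => k) false).Nodup :=
    (PySem.List.sorted_perm amap.keys (fun k => k) false).symm.nodup hnd
  exact (h1.and h2).imp (fun h => lt_of_le_of_ne h.1 h.2)

theorem pv_main (mset : List (String × String)) (chain : List Char) :
    (pvSeqA (chain.map (fun c => [c])) mset).flatten = pvSpliceB chain (pvAmapB (chain.length : Int) mset) := by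
  set init := chain.map (fun c => ([c] : List Char)) with hinit
  have hlen0 : init.length = chain.length := by simp [hinit]
  set amap := pvAmapB (chain.length : Int) mset with hamap
  set ks := PySem.List.sorted amap.keys (fun k => k) false with hks
  have hmemks : ∀ j : Int, j ∈ ks ↔ j ∈ amap.keys := fun j => PySem.List.mem_sorted _ _ _ _
  have hpair : ks.Pairwise (· < ·) := pv_pairwise_sorted amap (pv_nodup_keys _ _)
  have hbounds : ∀ k ∈ ks, ((0 : Nat) : Int) ≤ k ∧ k < (chain.length : Int) := by
    intro k hk
    have := pv_keys_range _ mset k ((hmemks k).1 hk)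
    exact ⟨by exact_mod_cast this.1, this.2⟩
  -- B side
  have hB : pvSpliceB chain amap
      = (List.range' 0 (chain.length - 0)).flatMap
          (fun (j : Nat) => if ((j : Int) ∈ ks) then amap.getD (j : Int) [] else (chain.drop j).take 1) := by
    unfold pvSpliceB
    rw [← hks]
    have := pv_splice_loop chain amap ks 0 [] hpair hbounds
    simpa using this
  -- A side
  rw [pv_flatten_eq, hB]
  have hl                       : (pvSeqA init mset).length = chain.length := by rw [pv_lenA, hlen0]
  rw [hl]
  simp only [Nat.sub_zero]
  apply List.flatMap_congr
  intro j hj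
  have hjn : j < chain.length := by have := List.mem_range'_1.1 hj; omega
  have hjn' : j < init.length := by omega
  rw [pv_elemA mset init j hjn', hlen0, ← hamap]
  have hinitj : init.getD j [] = (chain.drop j).take 1 := by
    have h2 : chain.drop j = chain[j] :: chain.drop (j + 1) := List.drop_eq_getElem_cons hjn
    rw [List.getD_eq_getElem init [] hjn', h2]
    simp only [List.take_succ_cons, List.take_zero]
    simp [hinit]
  rw [hinitj]
  cases hg : amap.get? (j : Int) with
  | none =>
      rw [if_neg]
      · rfl
      · rw [hmemks]
        exact (PySem.Dict.get?_eq_none_iff_not_mem_keys _ _).1 hg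
  | some v =>
      rw [if_pos]
      · exact (PySem.Dict.getD_of_get?_eq_some _ _ hg).symm
      · rw [hmemks]
        exact PySem.Dict.mem_keys_of_mem_items _ (PySem.Dict.mem_items_of_get?_eq_some _ hg)

-- ===== VERDICT (by name: the statement is the Claim_ definition above) =====
theorem all_on_1chain_spec : Claim_equal_all_on_1chain := by
  intro ap sc nn _ _
  unfold Spec_all_on_1chain all_on_1chain all_on_1chain_alt
  congr 1
  apply PySem.List.foldl_congr_mem
  intro acc p _
  rw [pv_main]
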